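-- pv_equiv track=rewrite | github.com/bakal3110/Python-Courses-and-Projects | PascalTri.py | search_pascal_multiples_fast5
-- ===== SOURCE A (Python) =====
-- def search_pascal_multiples_fast5(row_limit):
--     freq = {}
--
--     for n in range(10, row_limit + 1):
--         # Manual computation for small optimization
--         current = n * (n - 1) // 2
--         freq[current] = freq[current] + 1 if current in freq else 1
--
--         k = 2
--         while k < n - 2:
--             current = current * (n - k) // (k + 1)
--             freq[current] = freq[current] + 1 if current in freq else 1
--             k += 1
--
--     # Pre-allocate result array for speed
--     result = []
--     for val in freq:
--         if freq[val] > 3: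
--             result.append(val)
--
--     result.sort()
--     return result
-- ===== SOURCE B (Python) =====
-- def search_pascal_multiples_fast5(row_limit):
--     # Additive Pascal's triangle: build each row from the previous by summing
--     # adjacent entries; count interior entries (indices 2..n-2) for rows n >= 10.
--     freq = {}
--     row = [1]
--     for n in range(row_limit + 1):
--         if n >= 10:
--             for v in row[2:n-1]:
--                 freq[v] = freq.get(v, 0) + 1
--         row = [1] + [a + b for a, b in zip(row, row[1:])] + [1]
--     return sorted(v for v, c in freq.items() if c > 3)
-- ===== Notes on version B (the rewrite author's own statement) =====
-- stated objective: alternative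
-- what changed: Replaces the per-row multiplicative running-product recurrence (current = current*(n-k)//(k+1) with integer division) by the additive construction of Pascal's triangle (each row from the previous by summing adjacent entries), slicing the interior of each row and tallying with dict.get; the result is collected by a sorted comprehension over items instead of a key loop plus in-place sort.
import Mathlib
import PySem

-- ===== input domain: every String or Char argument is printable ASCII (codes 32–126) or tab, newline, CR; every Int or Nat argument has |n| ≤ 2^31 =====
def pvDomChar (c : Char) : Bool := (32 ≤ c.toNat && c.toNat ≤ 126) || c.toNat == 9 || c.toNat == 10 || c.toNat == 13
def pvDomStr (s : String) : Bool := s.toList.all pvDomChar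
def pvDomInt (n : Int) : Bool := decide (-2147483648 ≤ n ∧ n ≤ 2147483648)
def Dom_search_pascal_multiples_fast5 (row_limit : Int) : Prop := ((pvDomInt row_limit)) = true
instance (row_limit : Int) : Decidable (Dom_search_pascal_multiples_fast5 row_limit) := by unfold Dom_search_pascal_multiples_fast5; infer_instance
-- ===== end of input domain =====

-- B rebuilds Pascal's triangle additively (row from previous row) instead of A's
-- multiplicative running-product recurrence; same return value, similar cost.

-- ===== PORT A =====
-- freq[current] = freq[current] + 1 if current in freq else 1
def pvUpdA (d : PySem.Dict Int Int) (v : Int) : PySem.Dict Int Int :=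
  d.insert v (if d.contains v then d.getD v 0 + 1 else 1)

-- the inner 'while k < n - 2' loop (k increases by 1 each pass)
def pvAWhile (n k current : Int) (freq : PySem.Dict Int Int) : PySem.Dict Int Int :=
  if _h : k < n - 2 then
    let c := PySem.Int.floordiv (current * (n - k)) (k + 1)
    pvAWhile n (k + 1) c (pvUpdA freq c)
  else freq
termination_by (n - 2 - k).toNat
decreasing_by omega

-- the body of 'for n in range(10, row_limit + 1)'
def pvAStep (d : PySem.Dict Int Int) (n : Int) : PySem.Dict Int Int :=
  let current := PySem.Int.floordiv (n * (n - 1)) 2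
  pvAWhile n 2 current (pvUpdA d current)

def search_pascal_multiples_fast5 (row_limit : Int) : List Int :=
  let freq := (PySem.List.pyRange 10 (row_limit + 1) 1).foldl pvAStep PySem.Dict.empty
  let result := freq.keys.foldl
    (fun res val => if freq.getD val 0 > 3 then res ++ [val] else res) ([] : List Int)
  PySem.List.sorted result (fun x => x) false

-- ===== PORT B =====
-- freq[v] = freq.get(v, 0) + 1
def pvUpdB (d : PySem.Dict Int Int) (v : Int) : PySem.Dict Int Int :=
  d.insert v (d.getD v 0 + 1)

-- row = [1] + [a + b for a, b in zip(row, row[1:])] + [1]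
def pvNextRow (row : List Int) : List Int :=
  [1] ++ (row.zip (PySem.List.slice row (some 1) none)).map (fun p => p.1 + p.2) ++ [1]

-- one pass of B's 'for n in range(row_limit + 1)' body over the state (row, freq)
def pvBStep (st : List Int × PySem.Dict Int Int) (n : Int) : List Int × PySem.Dict Int Int :=
  let freq := if 10 ≤ n then
      (PySem.List.slice st.1 (some 2) (some (n - 1))).foldl pvUpdB st.2
    else st.2
  (pvNextRow st.1, freq)

def search_pascal_multiples_fast5_alt (row_limit : Int) : List Int :=
  let st := (PySem.List.pyRange 0 (row_limit + 1) 1).foldl pvBStep (([1] : List Int), PySem.Dict.empty)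
  PySem.List.sorted ((st.2.items.filter (fun p => 3 < p.2)).map (fun p => p.1)) (fun x => x) false

-- ===== PRECONDITION & SPEC =====
def Spec_search_pascal_multiples_fast5 (row_limit : Int) (out : List Int) : Prop := out = search_pascal_multiples_fast5_alt row_limit
instance (row_limit : Int) (out : List Int) : Decidable (Spec_search_pascal_multiples_fast5 row_limit out) := by unfold Spec_search_pascal_multiples_fast5; infer_instance

-- ===== CLAIM (what is proved, stated in full; the proofs are below) =====
def Claim_equal_search_pascal_multiples_fast5 : Prop := ∀ (row_limit : Int), Dom_search_pascal_multiples_fast5 row_limit → Spec_search_pascal_multiples_fast5 row_limit (search_pascal_multiples_fast5 row_limit)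

-- ===== LEMMAS AND PROOFS =====

-- row of Pascal's triangle as binomial coefficients
def rowOf (m : Nat) : List Int := (List.range (m + 1)).map (fun i => ((m.choose i : Nat) : Int))

-- interior values of row m (indices 2 .. m-2), the list both programs tally for n = m
def pvVals (m : Nat) : List Int := (List.range (m - 3)).map (fun k => ((m.choose (k + 2) : Nat) : Int))

theorem updA_eq_updB : pvUpdA = pvUpdB := by
  funext d v
  unfold pvUpdA pvUpdB
  by_cases h : d.contains v
  · simp [h]
  · simp only [Bool.not_eq_true] at h
    simp [h, PySem.Dict.getD_of_not_contains d 0 h]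

theorem nextRow_rowOf (m : Nat) : pvNextRow (rowOf m) = rowOf (m + 1) := by
  unfold pvNextRow rowOf
  rw [PySem.List.slice_from_one]
  have htail : (List.map (fun i => ((m.choose i : Nat) : Int)) (List.range (m + 1))).tail
      = List.map (fun i => ((m.choose (i + 1) : Nat) : Int)) (List.range m) := by
    rw [List.range_succ_eq_map]
    simp [Function.comp, Nat.succ_eq_add_one]
  rw [htail]
  have hsplit : List.map (fun i => ((m.choose i : Nat) : Int)) (List.range (m + 1))
      = List.map (fun i => ((m.choose i : Nat) : Int)) (List.range m) ++ [((m.choose m : Nat) : Int)] := by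
    rw [List.range_succ]; simp
  rw [hsplit, ← List.append_nil (List.map (fun i => ((m.choose (i + 1) : Nat) : Int)) (List.range m)),
    List.zip_append (by simp), List.zip_map']
  have hmid : List.map (fun p => p.1 + p.2)
        (List.map (fun a => (((m.choose a : Nat) : Int), ((m.choose (a + 1) : Nat) : Int))) (List.range m)
          ++ [((m.choose m : Nat) : Int)].zip [])
      = List.map (fun i => (((m + 1).choose (i + 1) : Nat) : Int)) (List.range m) := by
    simp [Nat.choose_succ_succ']
  rw [hmid]
  have : List.range (m + 1 + 1) = 0 :: List.map Nat.succ (List.range (m + 1)) := List.range_succ_eq_map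
  rw [this, List.range_succ]
  simp [Nat.succ_eq_add_one]

theorem slice_rowOf (m : Nat) (hm : 10 ≤ m) :
    PySem.List.slice (rowOf m) (some 2) (some ((m : Int) - 1)) = pvVals m := by
  unfold rowOf pvVals
  rw [PySem.List.slice_toNat _ (by omega) (by omega)]
  have h2 : ((2 : Int)).toNat = 2 := rfl
  have h1 : ((m : Int) - 1).toNat = m - 1 := by omega
  rw [h1, h2]
  have hr : List.range (m + 1) = List.range 2 ++ List.map (fun x => 2 + x) (List.range (m - 1)) := by
    have : m + 1 = 2 + (m - 1) := by omega
    rw [this, List.range_add]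
  rw [hr, List.map_append, List.drop_append_of_le_length (by simp)]
  rw [List.drop_of_length_le (by simp), List.nil_append, ← List.map_take, ← List.map_take, List.take_range]
  have hmin : min (m - 1 - 2) (m - 1) = m - 3 := by omega
  rw [hmin]
  rw [List.map_map]
  apply List.map_congr_left
  intro k _
  simp [Function.comp, Nat.add_comm]

theorem aWhile_aux (m : Nat) : ∀ (f j : Nat) (d : PySem.Dict Int Int), m - 2 - j = f → j ≤ m →
    pvAWhile (m : Int) (j : Int) ((m.choose j : Nat) : Int) d
      = ((List.range f).map (fun i => ((m.choose (j + 1 + i) : Nat) : Int))).foldl pvUpdA d := by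
  intro f
  induction f with
  | zero =>
    intro j d hf hj
    rw [pvAWhile, dif_neg (by omega)]
    simp
  | succ f ih =>
    intro j d hf hj
    have hjm : j + 3 ≤ m := by omega
    rw [pvAWhile, dif_pos (by omega)]
    have hsub : (m : Int) - (j : Int) = ((m - j : Nat) : Int) := by
      push_cast [Nat.cast_sub hj]; ring
    have hc : PySem.Int.floordiv (((m.choose j : Nat) : Int) * ((m : Int) - (j : Int))) ((j : Int) + 1)
        = ((m.choose (j + 1) : Nat) : Int) := by
      rw [hsub]
      have h1 : ((m.choose j : Nat) : Int) * ((m - j : Nat) : Int) = ((m.choose j * (m - j) : Nat) : Int) := by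
        push_cast; ring
      have h2 : ((j : Int) + 1) = ((j + 1 : Nat) : Int) := by push_cast; ring
      rw [h1, h2, PySem.Int.floordiv_natCast]
      congr 1
      rw [← Nat.choose_succ_right_eq]
      exact Nat.mul_div_cancel _ (by omega)
    simp only [hc]
    have hj1 : ((j : Int) + 1) = (((j + 1 : Nat)) : Int) := by push_cast; ring
    rw [hj1, ih (j + 1) (pvUpdA d _) (by omega) (by omega)]
    rw [List.range_succ_eq_map]
    simp only [List.map_cons, List.foldl_cons, List.map_map]
    congr 1
    apply List.map_congr_left
    intro i _
    simp only [Function.comp]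
    congr 2
    omega

theorem a_iter (m : Nat) (hm : 10 ≤ m) (d : PySem.Dict Int Int) :
    pvAStep d (m : Int) = (pvVals m).foldl pvUpdA d := by
  unfold pvAStep
  have hcur : PySem.Int.floordiv ((m : Int) * ((m : Int) - 1)) 2 = ((m.choose 2 : Nat) : Int) := by
    have h1 : (m : Int) * ((m : Int) - 1) = ((m * (m - 1) : Nat) : Int) := by
      push_cast [Nat.cast_sub (by omega : 1 ≤ m)]; ring
    have h2 : (2 : Int) = ((2 : Nat) : Int) := rfl
    rw [h1, h2, PySem.Int.floordiv_natCast, Nat.choose_two_right]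
  simp only [hcur]
  have h2 : (2 : Int) = ((2 : Nat) : Int) := rfl
  rw [h2, aWhile_aux m (m - 2 - 2) 2 _ rfl (by omega)]
  unfold pvVals
  have h3 : m - 3 = (m - 2 - 2) + 1 := by omega
  rw [h3, List.range_succ_eq_map]
  simp only [List.map_cons, List.foldl_cons, List.map_map]
  congr 1
  apply List.map_congr_left
  intro i _
  simp only [Function.comp]
  congr 2
  omega

theorem b_low (b : Int) (hb : b ≤ 10) : ∀ (a : Int) (st : List Int × PySem.Dict Int Int),
    ((PySem.List.pyRange a b 1).foldl pvBStep st).2 = st.2 := by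
  have key : ∀ (f : Nat) (a : Int) (st : List Int × PySem.Dict Int Int), (b - a).toNat = f →
      ((PySem.List.pyRange a b 1).foldl pvBStep st).2 = st.2 := by
    intro f
    induction f with
    | zero =>
      intro a st hf
      rw [PySem.List.pyRange_one_eq_nil (by omega)]
      rfl
    | succ f ih =>
      intro a st hf
      rw [PySem.List.pyRange_one_cons (by omega), List.foldl_cons, ih (a + 1) _ (by omega)]
      simp [pvBStep, show ¬(10 ≤ a) by omega]
  exact fun a st => key (b - a).toNat a st rfl

theorem foldl_updA_nodup : ∀ (l : List Int) (d : PySem.Dict Int Int),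
    d.keys.Nodup → (l.foldl pvUpdA d).keys.Nodup := by
  intro l
  induction l with
  | nil => intro d h; exact h
  | cons x xs ih =>
    intro d h
    exact ih _ (PySem.Dict.nodup_keys_insert d x _ h)

theorem b_step (m : Nat) (hm : 10 ≤ m) (d : PySem.Dict Int Int) :
    pvBStep (rowOf m, d) (m : Int) = (rowOf (m + 1), pvAStep d (m : Int)) := by
  unfold pvBStep
  simp only [if_pos (by exact_mod_cast hm : (10 : Int) ≤ (m : Int))]
  refine Prod.ext ?_ ?_
  · exact nextRow_rowOf m
  · show (PySem.List.slice (rowOf m) (some 2) (some ((m : Int) - 1))).foldl pvUpdB d = _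
    rw [slice_rowOf m hm, ← updA_eq_updB, a_iter m hm d]

theorem b_par (b : Int) : ∀ (f : Nat) (m : Nat) (d : PySem.Dict Int Int), (b - (m : Int)).toNat = f → 10 ≤ m →
    ((PySem.List.pyRange (m : Int) b 1).foldl pvBStep (rowOf m, d)).2
      = (PySem.List.pyRange (m : Int) b 1).foldl pvAStep d := by
  intro f
  induction f with
  | zero =>
    intro m d hf hm
    rw [PySem.List.pyRange_one_eq_nil (by omega)]
    rfl
  | succ f ih =>
    intro m d hf hm
    rw [PySem.List.pyRange_one_cons (by omega), List.foldl_cons, List.foldl_cons, b_step m hm d]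
    have h1 : (m : Int) + 1 = ((m + 1 : Nat) : Int) := by push_cast; ring
    rw [h1, ih (m + 1) (pvAStep d (m : Int)) (by omega) (by omega)]

theorem freq_nodup (rl : Int) :
    ((PySem.List.pyRange 10 (rl + 1) 1).foldl pvAStep PySem.Dict.empty).keys.Nodup := by
  have key : ∀ (l : List Int), (∀ n ∈ l, 10 ≤ n) → ∀ (d : PySem.Dict Int Int), d.keys.Nodup →
      (l.foldl pvAStep d).keys.Nodup := by
    intro l
    induction l with
    | nil => intro _ d h; exact h
    | cons x xs ih =>
      intro hmem d h
      have hx : 10 ≤ x := hmem x (List.mem_cons_self)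
      obtain ⟨m, rfl⟩ : ∃ m : Nat, x = (m : Int) := ⟨x.toNat, by omega⟩
      rw [List.foldl_cons, a_iter m (by exact_mod_cast hx) d]
      exact ih (fun n hn => hmem n (List.mem_cons_of_mem _ hn)) _ (foldl_updA_nodup _ _ h)
  refine key _ ?_ _ (by simp [PySem.Dict.keys_empty])
  intro n hn
  exact ((PySem.List.mem_pyRange_one).mp hn).1

theorem final_collect (F : PySem.Dict Int Int) (hn : F.keys.Nodup) :
    F.keys.foldl (fun res val => if F.getD val 0 > 3 then res ++ [val] else res) ([] : List Int)
      = (F.items.filter (fun p => 3 < p.2)).map (fun p => p.1) := by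
  have hbody : (fun (res : List Int) (val : Int) => if F.getD val 0 > 3 then res ++ [val] else res)
      = (fun res val => if (fun v => decide (3 < F.getD v 0)) val = true then res ++ [id val] else res) := by
    funext res val
    simp
  rw [hbody, PySem.List.foldl_append_if]
  simp only [List.nil_append, List.map_id]
  have hkeys : F.keys = F.items.map (fun p => p.1) := rfl
  rw [hkeys, List.filter_map]
  have hfilter : List.filter ((fun v => decide (3 < F.getD v 0)) ∘ (fun p : Int × Int => p.1)) F.items
      = List.filter (fun p : Int × Int => 3 < p.2) F.items := by
    apply List.filter_congr
    intro x hx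
    have := PySem.Dict.getD_of_mem_items F (show (x.1, x.2) ∈ F.items from hx) hn 0
    simp [Function.comp, this]
  rw [hfilter]

-- ===== VERDICT (by name: the statement is the Claim_ definition above) =====
theorem search_pascal_multiples_fast5_spec : Claim_equal_search_pascal_multiples_fast5 := by
  intro rl _
  unfold Spec_search_pascal_multiples_fast5
  simp only [search_pascal_multiples_fast5, search_pascal_multiples_fast5_alt]
  by_cases h : rl + 1 ≤ 10
  · rw [PySem.List.pyRange_one_eq_nil h, b_low (rl + 1) h 0 (([1], PySem.Dict.empty))]
    rfl
  · have hpre : (PySem.List.pyRange 0 10 1).foldl pvBStep (([1] : List Int), PySem.Dict.empty)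
        = (rowOf 10, PySem.Dict.empty) := by decide
    rw [PySem.List.pyRange_one_append 0 10 (rl + 1) (by omega) (by omega), List.foldl_append, hpre]
    have h10 : (10 : Int) = ((10 : Nat) : Int) := rfl
    rw [h10, b_par (rl + 1) ((rl + 1) - 10).toNat 10 PySem.Dict.empty (by omega) (by omega), ← h10]
    rw [final_collect _ (freq_nodup rl)]
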